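-- pv_equiv track=rewrite | github.com/pypi-data/pypi-mirror-359 | packages/AstecManager/astecmanager-1.0.9-py3-none-any.whl/AstecManager/libs/lineage_distance.py | get_direct_mother
-- ===== SOURCE A (Python) =====
-- def get_next_mother(cell,cell_lineage):
--     """
--
--     :param cell:
--     :param cell_lineage:
--
--     """
--     for celltest in cell_lineage:
--         for cellval in cell_lineage[celltest]:
--             if cellval==cell:
--                 return celltest
--     return None
--
-- def get_daughters(cell,cell_lineage):
--     """
--
--     :param cell:
--     :param cell_lineage:
--
--     """
--     d = []
--     for celltest in cell_lineage:
--         if celltest==cell: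
--             d=cell_lineage[celltest]
--     return d
--
-- def get_direct_mother(cell,cell_lineage,cellnames=None):
--     """
--
--     :param cell:
--     :param cell_lineage:
--     :param cellnames:  (Default value = None)
--
--     """
--     if not cell in cell_lineage:
--         return None
--     directmother = get_next_mother(cell,cell_lineage)
--     if directmother is None:
--         return cell
--     daughters = get_daughters(directmother,cell_lineage)
--     directmothertwice = get_next_mother(directmother, cell_lineage)
--     if directmothertwice is None or len(daughters) > 1:
--         return directmother
--     return get_direct_mother(directmother,cell_lineage)
-- ===== SOURCE B (Python) =====
-- def get_direct_mother(cell, cell_lineage, cellnames=None):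
--     if cell not in cell_lineage:
--         return None
--     # invert the lineage once: child -> first mother listing it
--     parent = {}
--     for mother, kids in cell_lineage.items():
--         for kid in kids:
--             if kid not in parent:
--                 parent[kid] = mother
--     current = cell
--     while True:
--         m = parent.get(current)
--         if m is None:
--             return current
--         if m not in parent or len(cell_lineage[m]) > 1:
--             return m
--         current = m
-- ===== Notes on version B (the rewrite author's own statement) =====
-- stated objective: alternative
-- what changed: B inverts the lineage once into a child-to-mother dict and climbs it in an iterative loop with dict lookups per step, instead of A's recursion that rescans the dict entries (get_next_mother, get_daughters) at each step; on typical shallow chains the upfront inversion costs what the rescans save, so the cost is similar.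
import Mathlib
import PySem

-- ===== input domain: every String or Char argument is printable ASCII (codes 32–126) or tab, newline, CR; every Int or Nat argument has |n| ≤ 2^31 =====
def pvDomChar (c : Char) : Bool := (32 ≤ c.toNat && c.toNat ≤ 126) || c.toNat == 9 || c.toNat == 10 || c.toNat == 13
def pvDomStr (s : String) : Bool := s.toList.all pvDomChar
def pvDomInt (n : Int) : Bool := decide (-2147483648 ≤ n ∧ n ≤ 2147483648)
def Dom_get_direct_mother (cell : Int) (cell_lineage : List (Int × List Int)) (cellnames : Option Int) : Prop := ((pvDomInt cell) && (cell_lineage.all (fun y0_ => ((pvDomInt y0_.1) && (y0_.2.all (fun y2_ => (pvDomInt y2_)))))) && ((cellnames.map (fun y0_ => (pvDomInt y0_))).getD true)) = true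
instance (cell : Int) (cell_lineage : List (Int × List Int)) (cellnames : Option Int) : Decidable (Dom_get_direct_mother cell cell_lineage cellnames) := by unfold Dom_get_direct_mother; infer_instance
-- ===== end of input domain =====

-- B inverts the lineage into a child→mother map once, then climbs it with an iterative loop of dict
-- lookups, instead of A's recursion that rescans the whole dict at every step (objective: alternative).


-- ===== PORT A =====
-- for celltest in cell_lineage: for cellval in cell_lineage[celltest]: if cellval==cell: return celltest
def get_next_mother (cell : Int) (items : List (Int × List Int)) : Option Int :=
  match items with
  | [] => none
  | (celltest, vals) :: rest =>
      if vals.contains cell then some celltest else get_next_mother cell rest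

-- d=[]; for celltest in cell_lineage: if celltest==cell: d=cell_lineage[celltest]; return d
def get_daughters (cell : Int) (items : List (Int × List Int)) : List Int :=
  items.foldl (fun d kv => if kv.1 == cell then kv.2 else d) []

-- the recursion of A; fuel (number of dict entries + 1) only makes the definition total:
-- inside Pre_ the chain stops before the fuel runs out (outside Pre_ Python A raises RecursionError)
def get_direct_mother_go : Nat → Int → List (Int × List Int) → Option Int
  | 0, _, _ => none
  | fuel+1, cell, items =>
      if items.any (fun kv => kv.1 == cell) then
        match get_next_mother cell items with
        | none => some cell
        | some directmother =>
            let daughters := get_daughters directmother items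
            match get_next_mother directmother items with
            | none => some directmother
            | some _ =>
                if daughters.length > 1 then some directmother
                else get_direct_mother_go fuel directmother items
      else none

def get_direct_mother (cell : Int) (cell_lineage : List (Int × List Int)) (cellnames : Option Int) : Option Int :=
  let items := (PySem.Dict.ofList cell_lineage).items   -- the Python dict the function receives
  get_direct_mother_go (items.length + 1) cell items

-- ===== PORT B =====
-- parent = {}; for mother, kids in cell_lineage.items(): for kid in kids: if kid not in parent: parent[kid] = mother
def gdm_parent_of (kids : List Int) (mother : Int) (p : PySem.Dict Int Int) : PySem.Dict Int Int :=
  kids.foldl (fun p kid => if p.contains kid then p else p.insert kid mother) p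

def gdm_parents (items : List (Int × List Int)) : PySem.Dict Int Int :=
  items.foldl (fun p kv => gdm_parent_of kv.2 kv.1 p) PySem.Dict.empty

-- len(cell_lineage[m]) for a key m of the dict
def gdm_kidsOf (items : List (Int × List Int)) (m : Int) : List Int :=
  (((items.find? (fun kv => kv.1 == m))).map (·.2)).getD []

-- the while-loop of B; same totality fuel as A's port
def gdm_climb : Nat → Int → PySem.Dict Int Int → List (Int × List Int) → Option Int
  | 0, _, _, _ => none
  | fuel+1, current, parent, items =>
      match parent.get? current with
      | none => some current
      | some m =>
          if (parent.get? m).isNone || (gdm_kidsOf items m).length > 1 then some m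
          else gdm_climb fuel m parent items

def get_direct_mother_alt (cell : Int) (cell_lineage : List (Int × List Int)) (cellnames : Option Int) : Option Int :=
  let items := (PySem.Dict.ofList cell_lineage).items
  if items.any (fun kv => kv.1 == cell) then
    gdm_climb (items.length + 1) cell (gdm_parents items) items
  else none

-- ===== PRECONDITION & SPEC =====
-- helpers of Pre_ (independent of both ports): the only-child mother chain of the lineage graph
def pvMotherOf (items : List (Int × List Int)) (c : Int) : Option Int :=
  ((items.find? (fun kv => kv.2.contains c))).map (·.1)

def pvStep (items : List (Int × List Int)) (c : Int) : Option Int :=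
  match pvMotherOf items c with
  | none => none
  | some m =>
      if (pvMotherOf items m).isNone then none
      else if ((((items.find? (fun kv => kv.1 == m))).map (·.2)).getD []).length > 1 then none
      else some m

def pvStops (items : List (Int × List Int)) : Nat → Int → Bool
  | 0, _ => false
  | fuel+1, c =>
      match pvStep items c with
      | none => true
      | some m => pvStops items fuel m

-- Pre_ excludes exactly the inputs on which Python A never terminates (RecursionError): a cell of the
-- dict whose chain of only-child mothers runs into a cycle; on every input where A returns, Pre_ holds.
def Pre_get_direct_mother (cell : Int) (cell_lineage : List (Int × List Int)) (cellnames : Option Int) : Prop :=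
  (!((PySem.Dict.ofList cell_lineage).items.any (fun kv => kv.1 == cell))
    || pvStops (PySem.Dict.ofList cell_lineage).items ((PySem.Dict.ofList cell_lineage).items.length + 1) cell) = true
instance (cell : Int) (cell_lineage : List (Int × List Int)) (cellnames : Option Int) : Decidable (Pre_get_direct_mother cell cell_lineage cellnames) := by unfold Pre_get_direct_mother; infer_instance

def pvWitness_get_direct_mother : Int × (List (Int × List Int)) × Option Int := (2, [(2, [3]), (1, [2])], none)

def Spec_get_direct_mother (cell : Int) (cell_lineage : List (Int × List Int)) (cellnames : Option Int) (out : Option Int) : Prop := out = get_direct_mother_alt cell cell_lineage cellnames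
instance (cell : Int) (cell_lineage : List (Int × List Int)) (cellnames : Option Int) (out : Option Int) : Decidable (Spec_get_direct_mother cell cell_lineage cellnames out) := by unfold Spec_get_direct_mother; infer_instance

-- ===== CLAIM (what is proved, stated in full; the proofs are below) =====
def Claim_equal_get_direct_mother : Prop := ∀ (cell : Int) (cell_lineage : List (Int × List Int)) (cellnames : Option Int), Dom_get_direct_mother cell cell_lineage cellnames → Pre_get_direct_mother cell cell_lineage cellnames → Spec_get_direct_mother cell cell_lineage cellnames (get_direct_mother cell cell_lineage cellnames)

-- ===== LEMMAS AND PROOFS =====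

-- the inverted map answers exactly what A's linear scan get_next_mother answers
lemma gdm_parent_of_get? (kids : List Int) (mother : Int) (p : PySem.Dict Int Int) (c : Int) :
    (gdm_parent_of kids mother p).get? c
      = (p.get? c).or (if kids.contains c then some mother else none) := by
  induction kids generalizing p with
  | nil => simp [gdm_parent_of]
  | cons kid rest ih =>
      simp only [gdm_parent_of, List.foldl_cons] at *
      by_cases hk : p.contains kid = true
      · rw [hk]; simp only [if_true]
        rw [ih]
        by_cases hc : c = kid
        · subst hc
          rw [PySem.Dict.contains_eq_isSome_get?] at hk
          rcases ho : p.get? c with _ | v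
          · rw [ho] at hk; simp at hk
          · simp [Option.or]
        · simp [hc]
      · rw [Bool.not_eq_true] at hk
        rw [hk]; simp only [Bool.false_eq_true, if_false]
        rw [ih]
        by_cases hc : c = kid
        · subst hc
          have hget : p.get? c = none := by
            rw [PySem.Dict.contains_eq_isSome_get?] at hk
            rcases ho : p.get? c with _ | v
            · rfl
            · rw [ho] at hk; simp at hk
          rw [PySem.Dict.get?_insert]
          simp [hget]
        · rw [PySem.Dict.get?_insert]
          simp [hc]

lemma gdm_parents_get?_aux (items : List (Int × List Int)) (p : PySem.Dict Int Int) (c : Int) :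
    (items.foldl (fun p kv => gdm_parent_of kv.2 kv.1 p) p).get? c
      = (p.get? c).or (get_next_mother c items) := by
  induction items generalizing p with
  | nil => simp [get_next_mother]
  | cons kv rest ih =>
      obtain ⟨k, vs⟩ := kv
      simp only [List.foldl_cons]
      rw [ih, gdm_parent_of_get?, get_next_mother]
      by_cases hm : c ∈ vs
      · simp [hm]
      · simp [hm]

lemma gdm_parents_get? (items : List (Int × List Int)) (c : Int) :
    (gdm_parents items).get? c = get_next_mother c items := by
  rw [gdm_parents, gdm_parents_get?_aux]
  simp

-- get_next_mother returns a key of the dict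
lemma get_next_mother_isKey {c m : Int} {items : List (Int × List Int)}
    (h : get_next_mother c items = some m) : items.any (fun kv => kv.1 == m) = true := by
  induction items with
  | nil => simp [get_next_mother] at h
  | cons kv rest ih =>
      obtain ⟨k, vs⟩ := kv
      rw [get_next_mother] at h
      by_cases hv : vs.contains c = true
      · rw [hv] at h; simp at h; simp [h]
      · rw [Bool.not_eq_true] at hv
        rw [hv] at h; simp only [Bool.false_eq_true, if_false] at h
        simp [ih h]

-- with unique keys, A's last-match fold equals B's first-match lookup
lemma get_daughters_untouched (m : Int) (l : List (Int × List Int)) (d : List Int)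
    (h : ∀ kv ∈ l, kv.1 ≠ m) :
    l.foldl (fun d kv => if kv.1 == m then kv.2 else d) d = d := by
  induction l generalizing d with
  | nil => rfl
  | cons kv rest ih =>
      have hk : (kv.1 == m) = false := by simpa using h kv (List.mem_cons_self)
      rw [List.foldl_cons, hk]
      simp only [Bool.false_eq_true, if_false]
      exact ih d (fun x hx => h x (List.mem_cons_of_mem _ hx))

lemma get_daughters_eq_kidsOf (m : Int) (items : List (Int × List Int))
    (hnd : (items.map Prod.fst).Nodup) :
    get_daughters m items = gdm_kidsOf items m := by
  induction items with
  | nil => rfl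
  | cons kv rest ih =>
      obtain ⟨k, vs⟩ := kv
      simp only [List.map_cons, List.nodup_cons] at hnd
      obtain ⟨hk, hrest⟩ := hnd
      by_cases hkm : k = m
      · subst hkm
        have hnone : ∀ kv ∈ rest, kv.1 ≠ k := by
          intro x hx hc
          exact hk (by rw [← hc]; exact List.mem_map_of_mem hx)
        simp only [get_daughters, List.foldl_cons, beq_self_eq_true, if_true]
        rw [get_daughters_untouched k rest vs hnone]
        simp [gdm_kidsOf]
      · have hb : (k == m) = false := by simpa using hkm
        simp only [get_daughters, List.foldl_cons, hb, Bool.false_eq_true, if_false]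
        rw [show rest.foldl (fun d kv => if kv.1 == m then kv.2 else d) [] = get_daughters m rest from rfl]
        rw [ih hrest]
        simp [gdm_kidsOf, hb]

-- lockstep: A's recursion equals B's climb, for every fuel
lemma go_eq_climb (items : List (Int × List Int)) (hnd : (items.map Prod.fst).Nodup) :
    ∀ (fuel : Nat) (c : Int),
      get_direct_mother_go fuel c items
        = if items.any (fun kv => kv.1 == c) then gdm_climb fuel c (gdm_parents items) items
          else none := by
  intro fuel
  induction fuel with
  | zero => intro c; simp [get_direct_mother_go, gdm_climb]
  | succ fuel ih =>
      intro c
      by_cases hc : items.any (fun kv => kv.1 == c) = true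
      · rw [get_direct_mother_go, if_pos hc, if_pos hc, gdm_climb, gdm_parents_get?]
        rcases h1 : get_next_mother c items with _ | m
        · rfl
        · simp only
          rw [gdm_parents_get?]
          rcases h2 : get_next_mother m items with _ | g
          · simp
          · have hdm := get_daughters_eq_kidsOf m items hnd
            simp only [Option.isNone_some, Bool.false_or, hdm]
            by_cases hlen : (gdm_kidsOf items m).length > 1
            · simp [hlen]
            · simp only [hlen, decide_false, Bool.false_eq_true, if_false]
              rw [ih m, if_pos (get_next_mother_isKey h1)]
      · rw [Bool.not_eq_true] at hc
        rw [get_direct_mother_go, hc, gdm_climb]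
        simp
-- ===== VERDICT (by name: the statement is the Claim_ definition above) =====
theorem get_direct_mother_spec : Claim_equal_get_direct_mother := by
  intro cell cell_lineage cellnames _ _
  unfold Spec_get_direct_mother get_direct_mother get_direct_mother_alt
  have hnd : (((PySem.Dict.ofList cell_lineage).items.map Prod.fst)).Nodup := by
    have := PySem.Dict.nodup_keys_ofList (ps := cell_lineage)
    simpa [PySem.Dict.keys] using this
  exact go_eq_climb _ hnd _ cell
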